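-- pv_equiv track=rewrite | github.com/BJCarmona/ProgrammingCourse | Chapter2/Class2-1/Homework1.1.py | max_recursive
-- ===== SOURCE A (Python) =====
-- def max_recursive(lista,maximo=0):
--     if len(lista) == 0:  # caso base
--         return maximo
--     else:
--         b=lista.pop()
--         if b>maximo:
--             maximo=b
--         return max_recursive(lista,maximo)
-- ===== SOURCE B (Python) =====
-- def max_recursive(lista, maximo=0):
--     # Single forward pass; same return value as A. Note: A empties `lista`
--     # via pop(); B does not mutate it (return-value equivalence only).
--     for b in lista:
--         if b > maximo:
--             maximo = b
--     return maximo
-- ===== Notes on version B (the rewrite author's own statement) =====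
-- stated objective: simpler
-- what changed: Replaced the recursion that pops elements off the end with a single forward for-loop accumulating the running maximum (no mutation of the input list).
import Mathlib
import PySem

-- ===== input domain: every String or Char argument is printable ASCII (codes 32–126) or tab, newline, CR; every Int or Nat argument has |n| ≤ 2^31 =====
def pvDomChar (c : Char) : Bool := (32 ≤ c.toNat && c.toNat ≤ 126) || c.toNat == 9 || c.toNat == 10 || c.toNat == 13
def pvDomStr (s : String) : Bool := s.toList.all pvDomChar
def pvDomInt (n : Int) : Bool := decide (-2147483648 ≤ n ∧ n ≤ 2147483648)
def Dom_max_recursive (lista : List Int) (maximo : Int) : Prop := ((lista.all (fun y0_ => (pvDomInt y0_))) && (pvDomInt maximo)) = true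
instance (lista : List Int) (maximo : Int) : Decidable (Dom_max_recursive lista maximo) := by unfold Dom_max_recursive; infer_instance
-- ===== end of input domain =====

-- B replaces A's pop-and-recurse with a single forward fold (simpler, no recursion); A empties `lista` in place, B does not mutate it — equivalence proved is about the RETURN value only.


-- ===== PORT A =====
-- pop() = take the last element (List.getLast) and recurse on the rest (List.dropLast)
def max_recursive (lista : List Int) (maximo : Int) : Int :=
  if h : lista.length = 0 then maximo
  else
    let b := lista.getLast (by intro hn; simp [hn] at h)
    let maximo := if b > maximo then b else maximo
    max_recursive lista.dropLast maximo
termination_by lista.length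
decreasing_by simp [List.length_dropLast]; omega

-- ===== PORT B =====
-- B: single forward fold over the list (B does not mutate the list; A empties it —
-- the equivalence proved here is about the return value)
def max_recursive_alt (lista : List Int) (maximo : Int) : Int :=
  lista.foldl (fun maximo b => if b > maximo then b else maximo) maximo

-- ===== PRECONDITION & SPEC =====
def Spec_max_recursive (lista : List Int) (maximo : Int) (out : Int) : Prop := out = max_recursive_alt lista maximo
instance (lista : List Int) (maximo : Int) (out : Int) : Decidable (Spec_max_recursive lista maximo out) := by unfold Spec_max_recursive; infer_instance

-- ===== CLAIM (what is proved, stated in full; the proofs are below) =====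
def Claim_equal_max_recursive : Prop := ∀ (lista : List Int) (maximo : Int), Dom_max_recursive lista maximo → Spec_max_recursive lista maximo (max_recursive lista maximo)

-- ===== LEMMAS AND PROOFS =====

-- ===== VERDICT (by name: the statement is the Claim_ definition above) =====
lemma step_foldl (l : List Int) (m a : Int) :
    l.foldl (fun maximo b => if b > maximo then b else maximo) (if a > m then a else m)
      = (if a > l.foldl (fun maximo b => if b > maximo then b else maximo) m then a
         else l.foldl (fun maximo b => if b > maximo then b else maximo) m) := by
  induction l generalizing m a with
  | nil => simp
  | cons c t ih =>
      simp only [List.foldl_cons]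
      rw [show (if c > if a > m then a else m then c else if a > m then a else m)
            = (if a > if c > m then c else m then a else if c > m then c else m) by
          split_ifs <;> omega]
      exact ih _ _

lemma maxrec_eq (l : List Int) (m : Int) :
    max_recursive l m = max_recursive_alt l m := by
  induction hn : l.length generalizing l m with
  | zero =>
      rw [max_recursive]
      simp_all [max_recursive_alt, List.length_eq_zero_iff.mp hn]
  | succ n ih =>
      rw [max_recursive]
      have hne : ¬ l.length = 0 := by omega
      simp only [hne, dite_false]
      rw [ih _ _ (by simp [List.length_dropLast]; omega)]
      have hl : l = l.dropLast ++ [l.getLast (by intro h; simp [h] at hne)] :=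
        (List.dropLast_append_getLast _).symm
      conv_rhs => rw [max_recursive_alt, hl]
      simp only [List.foldl_append, List.foldl_cons, List.foldl_nil, max_recursive_alt]
      rw [step_foldl]

theorem max_recursive_spec : Claim_equal_max_recursive := by
  intro l m _
  unfold Spec_max_recursive
  exact maxrec_eq l m
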